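-- pv_equiv track=rewrite | github.com/Soheil-jafari/Language-Guided-Endoscopy-Localization | comparison_models/xclip_baseline/xclip_package/xclip/metrics.py | merge_binary_sequence
-- ===== SOURCE A (Python) =====
-- from typing import List, Tuple, Dict
--
-- def merge_binary_sequence(y: List[int], min_gap:int=0, min_len:int=1) -> List[Tuple[int,int]]:
--     """
--     Turn a binary frame array into segments [start, end) with optional gap closing and min length.
--     """
--     segs = []
--     in_seg = False
--     start = 0
--     for i, v in enumerate(y + [0]): # sentinel
--         if v and not in_seg:
--             in_seg = True
--             start = i
--         elif not v and in_seg: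
--             end = i
--             segs.append((start, end))
--             in_seg = False
--     # merge short gaps
--     if min_gap > 0 and segs:
--         merged = [segs[0]]
--         for s,e in segs[1:]:
--             ps,pe = merged[-1]
--             if s - pe <= min_gap:
--                 merged[-1] = (ps, e)
--             else:
--                 merged.append((s,e))
--         segs = merged
--     # filter short segments
--     segs = [(s,e) for (s,e) in segs if (e - s) >= min_len]
--     return segs
-- ===== SOURCE B (Python) =====
-- from typing import List, Tuple
--
-- def merge_binary_sequence(y: List[int], min_gap: int = 0, min_len: int = 1) -> List[Tuple[int, int]]:
--     """Edge detection: find rising/falling edges on the zero-padded array, pair them,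
--     then close short gaps by a back-to-front merge and drop short segments."""
--     padded = [0] + list(y) + [0]
--     starts = [i for i, (p, c) in enumerate(zip(padded, padded[1:])) if not p and c]
--     ends = [i for i, (p, c) in enumerate(zip(padded, padded[1:])) if p and not c]
--     segs = list(zip(starts, ends))
--     if min_gap > 0:
--         merged = []
--         for s, e in reversed(segs):
--             if merged and merged[0][0] - e <= min_gap:
--                 merged[0] = (s, merged[0][1])
--             else:
--                 merged.insert(0, (s, e))
--         segs = merged
--     return [(s, e) for (s, e) in segs if e - s >= min_len]
-- ===== Notes on version B (the rewrite author's own statement) =====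
-- stated objective: alternative
-- what changed: Segment extraction becomes edge detection on the zero-padded array (rising/falling edge index lists zipped into segments) instead of A's in_seg/start state machine, and the gap merge becomes a back-to-front fold that fuses with the head of the accumulator instead of A's left-to-right loop mutating the last merged segment in place.
import Mathlib
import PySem

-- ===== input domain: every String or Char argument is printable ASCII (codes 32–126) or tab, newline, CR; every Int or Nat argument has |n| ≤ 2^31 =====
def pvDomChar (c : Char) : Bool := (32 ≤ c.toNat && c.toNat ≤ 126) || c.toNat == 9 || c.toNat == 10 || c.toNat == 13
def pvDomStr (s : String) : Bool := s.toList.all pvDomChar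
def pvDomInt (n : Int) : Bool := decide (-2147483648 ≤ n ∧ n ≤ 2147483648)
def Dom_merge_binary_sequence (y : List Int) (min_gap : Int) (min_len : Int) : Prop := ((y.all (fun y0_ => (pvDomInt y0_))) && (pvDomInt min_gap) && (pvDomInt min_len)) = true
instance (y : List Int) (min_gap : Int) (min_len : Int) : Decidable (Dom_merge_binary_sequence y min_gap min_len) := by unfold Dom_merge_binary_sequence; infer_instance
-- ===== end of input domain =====

-- B replaces A's state-machine scan by edge detection (starts/ends lists zipped into
-- segments) and A's carried-last left-to-right gap merge by a back-to-front merge;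
-- objective: alternative decomposition, same O(n) cost.

-- ===== PORT A =====
-- A's for-loop over enumerate(y + [0]) with state (segs, in_seg, start); i is the counter.
def mbsScanA : List Int → Int → List (Int × Int) → Bool → Int → List (Int × Int)
  | [], _, segs, _, _ => segs
  | v :: vs, i, segs, inseg, start =>
    if v ≠ 0 ∧ inseg = false then mbsScanA vs (i + 1) segs true i
    else if v = 0 ∧ inseg = true then mbsScanA vs (i + 1) (segs ++ [(start, i)]) false start
    else mbsScanA vs (i + 1) segs inseg start

-- A's merge loop: merged[-1] is carried as (ps, pe), the rest already emitted in front.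
def mbsMergeA (g : Int) : Int → Int → List (Int × Int) → List (Int × Int)
  | ps, pe, [] => [(ps, pe)]
  | ps, pe, (s, e) :: rest =>
    if s - pe ≤ g then mbsMergeA g ps e rest else (ps, pe) :: mbsMergeA g s e rest

def merge_binary_sequence (y : List Int) (min_gap : Int) (min_len : Int) : List (Int × Int) :=
  let segs := mbsScanA (y ++ [0]) 0 [] false 0
  let segs2 :=
    if min_gap > 0 then
      match segs with
      | [] => segs
      | (ps, pe) :: rest => mbsMergeA min_gap ps pe rest
    else segs
  segs2.filter (fun se => se.2 - se.1 ≥ min_len)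

-- ===== PORT B =====
-- rising edges of [0] ++ y ++ [0]: prev falsy, current truthy (p carries the previous value)
def mbsStarts : Int → List Int → Int → List Int
  | p, v :: vs, i => if p = 0 ∧ v ≠ 0 then i :: mbsStarts v vs (i + 1) else mbsStarts v vs (i + 1)
  | _, [], _ => []

-- falling edges: prev truthy, current falsy
def mbsEnds : Int → List Int → Int → List Int
  | p, v :: vs, i => if p ≠ 0 ∧ v = 0 then i :: mbsEnds v vs (i + 1) else mbsEnds v vs (i + 1)
  | _, [], _ => []

-- back-to-front gap merge: prepend seg, fusing with the head when the gap is small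
def mbsMergeStepB (g : Int) (seg : Int × Int) (acc : List (Int × Int)) : List (Int × Int) :=
  match acc with
  | (s2, e2) :: tl => if s2 - seg.2 ≤ g then (seg.1, e2) :: tl else seg :: (s2, e2) :: tl
  | [] => [seg]

def merge_binary_sequence_alt (y : List Int) (min_gap : Int) (min_len : Int) : List (Int × Int) :=
  let starts := mbsStarts 0 (y ++ [0]) 0
  let ends := mbsEnds 0 (y ++ [0]) 0
  let segs := List.zip starts ends
  let segs2 := if min_gap > 0 then segs.foldr (mbsMergeStepB min_gap) [] else segs
  segs2.filter (fun se => se.2 - se.1 ≥ min_len)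

-- ===== PRECONDITION & SPEC =====
def Spec_merge_binary_sequence (y : List Int) (min_gap : Int) (min_len : Int) (out : List (Int × Int)) : Prop := out = merge_binary_sequence_alt y min_gap min_len
instance (y : List Int) (min_gap : Int) (min_len : Int) (out : List (Int × Int)) : Decidable (Spec_merge_binary_sequence y min_gap min_len out) := by unfold Spec_merge_binary_sequence; infer_instance

-- ===== CLAIM (what is proved, stated in full; the proofs are below) =====
def Claim_equal_merge_binary_sequence : Prop := ∀ (y : List Int) (min_gap : Int) (min_len : Int), Dom_merge_binary_sequence y min_gap min_len → Spec_merge_binary_sequence y min_gap min_len (merge_binary_sequence y min_gap min_len)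

-- ===== LEMMAS AND PROOFS =====

-- A's scan equals the zip of rising and falling edges; the carried flag corresponds to
-- the previous value being truthy, and an open segment contributes its pending start.
theorem mbsScanA_eq_zip : ∀ (vs : List Int) (p i s : Int) (acc : List (Int × Int)) (inseg : Bool),
    (inseg = false ↔ p = 0) →
    mbsScanA vs i acc inseg s =
      acc ++ List.zip ((if inseg then [s] else []) ++ mbsStarts p vs i) (mbsEnds p vs i) := by
  intro vs
  induction vs with
  | nil =>
    intro p i s acc inseg _
    cases inseg <;> simp [mbsScanA, mbsStarts, mbsEnds]
  | cons v vs ih =>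
    intro p i s acc inseg hp
    simp only [mbsScanA, mbsStarts, mbsEnds]
    cases inseg with
    | false =>
      have hp0 : p = 0 := hp.mp rfl
      subst hp0
      by_cases hv : v = 0
      · subst hv
        simpa using ih 0 (i + 1) s acc false (by simp)
      · simpa [hv] using ih v (i + 1) i acc true (by simp [hv])
    | true =>
      have hpne : p ≠ 0 := fun h0 => by simpa using hp.mpr h0
      by_cases hv : v = 0
      · simpa [hv, hpne] using ih v (i + 1) s (acc ++ [(s, i)]) false (by simp [hv])
      · simpa [hv, hpne] using ih v (i + 1) s acc true (by simp [hv])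

theorem mbsMergeA_head (g : Int) : ∀ (rest : List (Int × Int)) (pe : Int),
    ∃ E T, ∀ a : Int, mbsMergeA g a pe rest = (a, E) :: T := by
  intro rest
  induction rest with
  | nil => intro pe; exact ⟨pe, [], fun a => rfl⟩
  | cons se rest ih =>
    intro pe
    obtain ⟨s, e⟩ := se
    by_cases h : s - pe ≤ g
    · obtain ⟨E, T, hET⟩ := ih e
      exact ⟨E, T, fun a => by simp [mbsMergeA, h, hET a]⟩
    · exact ⟨pe, mbsMergeA g s e rest, fun a => by simp [mbsMergeA, h]⟩

theorem mbsMergeA_eq_foldr (g : Int) : ∀ (rest : List (Int × Int)) (ps pe : Int),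
    mbsMergeA g ps pe rest = ((ps, pe) :: rest).foldr (mbsMergeStepB g) [] := by
  intro rest
  induction rest with
  | nil => intro ps pe; simp [mbsMergeA, List.foldr, mbsMergeStepB]
  | cons se rest ih =>
    intro ps pe
    obtain ⟨s, e⟩ := se
    obtain ⟨E, T, hET⟩ := mbsMergeA_head g rest e
    have hB : ((s, e) :: rest).foldr (mbsMergeStepB g) [] = (s, E) :: T := by
      rw [← ih s e]; exact hET s
    rw [List.foldr_cons, hB]
    by_cases h : s - pe ≤ g
    · rw [show mbsMergeA g ps pe ((s, e) :: rest) = mbsMergeA g ps e rest from by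
        rw [mbsMergeA]; simp [h]]
      rw [hET ps]
      simp only [mbsMergeStepB]
      rw [if_pos h]
    · rw [show mbsMergeA g ps pe ((s, e) :: rest) = (ps, pe) :: mbsMergeA g s e rest from by
        rw [mbsMergeA]; simp [h]]
      rw [hET s]
      simp only [mbsMergeStepB]
      rw [if_neg h]

-- ===== VERDICT (by name: the statement is the Claim_ definition above) =====
theorem merge_binary_sequence_spec : Claim_equal_merge_binary_sequence := by
  intro y g l _
  show merge_binary_sequence y g l = merge_binary_sequence_alt y g l
  unfold merge_binary_sequence merge_binary_sequence_alt
  have hscan : mbsScanA (y ++ [0]) 0 [] false 0 =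
      List.zip (mbsStarts 0 (y ++ [0]) 0) (mbsEnds 0 (y ++ [0]) 0) := by
    simpa using mbsScanA_eq_zip (y ++ [0]) 0 0 0 [] false (by simp)
  rw [hscan]
  by_cases hg : g > 0
  · simp only [if_pos hg]
    cases h : List.zip (mbsStarts 0 (y ++ [0]) 0) (mbsEnds 0 (y ++ [0]) 0) with
    | nil => simp
    | cons hd tl =>
      obtain ⟨ps, pe⟩ := hd
      exact congrArg _ (mbsMergeA_eq_foldr g tl ps pe)
  · simp [hg]
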